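-- pv_equiv track=rewrite | github.com/choala/coding-test | E-PPER/simple_implementation/OX 퀴즈.py | solution
-- ===== SOURCE A (Python) =====
-- def solution(user_input):
--     user_input = list(user_input)
--     prev = ""
--     seriesCnt = 1
--     total_score = 0
--
--     for c in user_input:
--         if c == "O":
--             if prev == "O":
--                 seriesCnt += 1
--                 total_score += seriesCnt
--                 prev = "O"
--             else:
--                 total_score += seriesCnt
--                 prev = "O"
--         else:
--             seriesCnt = 1
--             prev = "X"
--
--     return total_score
-- ===== SOURCE B (Python) =====
-- def solution(user_input):
--     chars = list(user_input)
--     n = len(chars)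
--     total = 0
--     i = 0
--     while i < n:
--         j = i
--         while j < n and chars[j] == chars[i]:
--             j += 1
--         if chars[i] == "O":
--             L = j - i
--             total += L * (L + 1) // 2
--         i = j
--     return total
-- ===== Notes on version B (the rewrite author's own statement) =====
-- stated objective: alternative
-- what changed: B decomposes the string into maximal runs of equal characters and adds each O-run's score in closed form L*(L+1)//2, replacing A's per-character state machine (prev/seriesCnt).
import Mathlib
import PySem

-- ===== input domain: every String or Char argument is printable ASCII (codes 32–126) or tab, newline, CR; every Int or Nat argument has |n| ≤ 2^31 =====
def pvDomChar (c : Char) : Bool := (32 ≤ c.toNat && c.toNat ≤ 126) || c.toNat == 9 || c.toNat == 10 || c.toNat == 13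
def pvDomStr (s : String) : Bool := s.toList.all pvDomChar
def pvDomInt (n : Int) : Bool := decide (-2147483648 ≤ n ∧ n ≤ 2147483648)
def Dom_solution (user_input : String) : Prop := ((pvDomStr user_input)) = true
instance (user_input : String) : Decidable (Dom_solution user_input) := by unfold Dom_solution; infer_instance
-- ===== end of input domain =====

-- B replaces A's per-character prev/seriesCnt state machine by a run decomposition:
-- each maximal run of equal characters is measured once and an O-run of length L
-- contributes L*(L+1)//2 in closed form.

-- ===== PORT A =====
-- one iteration of A's for-loop; state = (prev, seriesCnt, total_score)
def stepA (st : String × Int × Int) (c : Char) : String × Int × Int :=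
  if c = 'O' then
    if st.1 = "O" then ("O", st.2.1 + 1, st.2.2 + (st.2.1 + 1))
    else ("O", st.2.1, st.2.2 + st.2.1)
  else ("X", 1, st.2.2)

def solution (user_input : String) : Int :=
  (user_input.toList.foldl stepA ("", 1, 0)).2.2

-- ===== PORT B =====
-- inner while loop of Source B: length of the maximal prefix equal to c, and the rest
def takeRun (c : Char) : List Char → Nat × List Char
  | [] => (0, [])
  | d :: rest =>
    if d = c then
      let p := takeRun c rest
      (p.1 + 1, p.2)
    else (0, d :: rest)

theorem takeRun_length_le (c : Char) (l : List Char) : (takeRun c l).2.length ≤ l.length := by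
  induction l with
  | nil => simp [takeRun]
  | cons d rest ih =>
    simp only [takeRun]
    split
    · exact Nat.le_succ_of_le ih
    · simp

-- L*(L+1)//2
def triB (L : Int) : Int := PySem.Int.floordiv (L * (L + 1)) 2

-- outer while loop of Source B: consume one run at a time
def runsGo : List Char → Int
  | [] => 0
  | c :: rest =>
    let p := takeRun c rest
    (if c = 'O' then triB ((p.1 : Int) + 1) else 0) + runsGo p.2
termination_by l => l.length
decreasing_by
  exact Nat.lt_succ_of_le (takeRun_length_le _ _)

def solution_alt (user_input : String) : Int := runsGo user_input.toList

-- ===== PRECONDITION & SPEC =====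
def Spec_solution (user_input : String) (out : Int) : Prop := out = solution_alt user_input
instance (user_input : String) (out : Int) : Decidable (Spec_solution user_input out) := by unfold Spec_solution; infer_instance

-- ===== CLAIM (what is proved, stated in full; the proofs are below) =====
def Claim_equal_solution : Prop := ∀ (user_input : String), Dom_solution user_input → Spec_solution user_input (solution user_input)

-- ===== LEMMAS AND PROOFS =====

theorem triB_succ (x : Int) : triB (x + 1) = triB x + (x + 1) := by
  unfold triB
  have h : (x + 1) * (x + 1 + 1) = x * (x + 1) + (x + 1) * 2 := by ring
  rw [h]
  exact Int.add_mul_fdiv_right _ _ (by norm_num : (2:Int) ≠ 0)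

theorem triB_zero : triB 0 = 0 := by decide

-- decomposition of a list into its first run and the remainder
theorem takeRun_decomp (c : Char) (l : List Char) :
    l = List.replicate (takeRun c l).1 c ++ (takeRun c l).2 := by
  induction l with
  | nil => simp [takeRun]
  | cons d rest ih =>
    simp only [takeRun]
    split
    · next h =>
      simp only [List.replicate_succ, List.cons_append]
      rw [h]; exact congrArg (List.cons c) ih
    · simp

theorem takeRun_head (c : Char) (l : List Char) (h : Char)
    (hh : (takeRun c l).2.head? = some h) : h ≠ c := by
  induction l with
  | nil => simp [takeRun] at hh
  | cons d rest ih =>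
    simp only [takeRun] at hh
    split at hh
    · exact ih hh
    · next hd =>
      simp only [List.head?] at hh
      injection hh with hdh
      exact fun he => hd (hdh.symm ▸ he)

-- a run of non-'O' characters leaves the reset state unchanged
theorem foldl_nonO (c : Char) (hc : c ≠ 'O') (n : Nat) (t : Int) :
    List.foldl stepA ("X", 1, t) (List.replicate n c) = ("X", 1, t) := by
  induction n with
  | zero => rfl
  | succ m ih =>
    rw [List.replicate_succ, List.foldl_cons]
    have : stepA ("X", 1, t) c = ("X", 1, t) := by simp [stepA, hc]
    rw [this, ih]

-- continuing an O-run of length m from in-run state (prev="O", cnt=k)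
theorem foldl_O_run (m : Nat) : ∀ (k t : Int),
    List.foldl stepA ("O", k, t) (List.replicate m 'O')
      = ("O", k + m, t + m * k + triB m) := by
  induction m with
  | zero => intro k t; simp [triB_zero]
  | succ m ih =>
    intro k t
    rw [List.replicate_succ, List.foldl_cons]
    have hs : stepA ("O", k, t) 'O' = ("O", k + 1, t + (k + 1)) := by
      simp [stepA]
    rw [hs, ih]
    refine Prod.ext rfl (Prod.ext ?_ ?_) <;> simp
    · ring
    · rw [triB_succ (m : Int)]; ring

-- main invariant: from a "fresh" state (or an in-run state whose next char breaks the
-- run), A's remaining total equals B's score of the remaining list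
theorem mainInv : ∀ (n : Nat) (l : List Char), l.length ≤ n → ∀ (p : String) (k t : Int),
    (p = "O" → ∀ h, l.head? = some h → h ≠ 'O') → (p ≠ "O" → k = 1) →
    (List.foldl stepA (p, k, t) l).2.2 = t + runsGo l := by
  intro n
  induction n with
  | zero =>
    intro l hl p k t _ _
    have : l = [] := List.eq_nil_of_length_eq_zero (Nat.le_zero.mp hl)
    subst this; simp [runsGo]
  | succ n ih =>
    intro l hl p k t hO hk
    match l with
    | [] => simp [runsGo]
    | c :: rest =>
      by_cases hc : c = 'O'
      · -- c = 'O'; then p ≠ "O" (else hO contradicts), so k = 1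
        subst hc
        have hp : p ≠ "O" := fun hpO => (hO hpO 'O' rfl) rfl
        have hk1 : k = 1 := hk hp
        subst hk1
        have hstep : stepA (p, 1, t) 'O' = ("O", 1, t + 1) := by
          simp [stepA, hp]
        rw [List.foldl_cons, hstep]
        obtain ⟨m, r, hm, hr⟩ : ∃ m r, (takeRun 'O' rest).1 = m ∧ (takeRun 'O' rest).2 = r :=
          ⟨_, _, rfl, rfl⟩
        have hdec : rest = List.replicate m 'O' ++ r := by
          rw [← hm, ← hr]; exact takeRun_decomp _ _
        have key : List.foldl stepA ("O", 1, t + 1) rest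
            = List.foldl stepA ("O", 1 + (m : Int), t + 1 + (m : Int) * 1 + triB m) r := by
          conv_lhs => rw [hdec]
          rw [List.foldl_append, foldl_O_run]
        have hrlen : r.length ≤ n := by
          have h1 := hr ▸ takeRun_length_le 'O' rest
          have h2 : rest.length ≤ n := by simpa using Nat.succ_le_succ_iff.mp hl
          omega
        have hrO : ∀ h, r.head? = some h → h ≠ 'O' := by
          intro h hh
          exact takeRun_head 'O' rest h (hr ▸ hh)
        have hrec := ih r hrlen "O" (1 + (m : Int)) (t + 1 + (m : Int) * 1 + triB m)
          (fun _ => hrO) (fun hq => absurd rfl hq)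
        rw [key, hrec]
        simp only [runsGo, hm, hr]
        have := triB_succ (m : Int)
        push_cast
        rw [this]; ring
      · -- c ≠ 'O': state resets; skip c's whole run
        have hstep : stepA (p, k, t) c = ("X", 1, t) := by
          simp [stepA, hc]
        rw [List.foldl_cons, hstep]
        obtain ⟨m, r, hm, hr⟩ : ∃ m r, (takeRun c rest).1 = m ∧ (takeRun c rest).2 = r :=
          ⟨_, _, rfl, rfl⟩
        have hdec : rest = List.replicate m c ++ r := by
          rw [← hm, ← hr]; exact takeRun_decomp _ _
        have key : List.foldl stepA ("X", 1, t) rest = List.foldl stepA ("X", 1, t) r := by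
          conv_lhs => rw [hdec]
          rw [List.foldl_append, foldl_nonO c hc]
        have hrlen : r.length ≤ n := by
          have h1 := hr ▸ takeRun_length_le c rest
          have h2 : rest.length ≤ n := by simpa using Nat.succ_le_succ_iff.mp hl
          omega
        have hrec := ih r hrlen "X" 1 t (by intro h; exact absurd h (by decide))
          (fun _ => rfl)
        rw [key, hrec]
        simp only [runsGo, if_neg hc, hm, hr, zero_add]

-- ===== VERDICT (by name: the statement is the Claim_ definition above) =====
theorem solution_spec : Claim_equal_solution := by
  intro s _
  unfold Spec_solution solution solution_alt
  have := mainInv s.toList.length s.toList le_rfl "" 1 0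
    (by intro h; exact absurd h (by decide)) (fun _ => rfl)
  rw [this, zero_add]
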